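-- pv_equiv track=rewrite | github.com/funktor/stokastik | Spell Correct/Utilities.py | breakWordIntoNgrams
-- ===== SOURCE A (Python) =====
-- def breakWordIntoNgrams(word, ngram_size=2):
--     if (ngram_size == 1):
--         return list(word)
--     else:
--         ngrams = []
--         for i in range(len(word) - ngram_size + 1):
--             out = breakWordIntoNgrams(word[i + 1:], ngram_size - 1)
--             out = [word[i] + x for x in out]
--             ngrams = ngrams + out
--
--     return ngrams
-- ===== SOURCE B (Python) =====
-- def breakWordIntoNgrams(word, ngram_size=2):
--     # DP over suffixes: one right-to-left pass maintaining, for each j <= k,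
--     # the length-j subsequences of the processed suffix (index-lexicographic order).
--     k = ngram_size
--     if k > len(word):
--         return []
--     table = [[] for _ in range(k + 1)]
--     table[0] = ['']
--     for c in reversed(word):
--         table = [table[0]] + [[c + x for x in table[j - 1]] + table[j]
--                               for j in range(1, k + 1)]
--     return table[k]
-- ===== Notes on version B (the rewrite author's own statement) =====
-- stated objective: alternative
-- what changed: Replaces A's branching recursion over word suffixes (re-deriving the sub-ngrams of each suffix) by a single right-to-left dynamic-programming pass that maintains, for each j <= k, the list of length-j subsequences of the processed suffix, emitting identical strings in identical order.
import Mathlib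
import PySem

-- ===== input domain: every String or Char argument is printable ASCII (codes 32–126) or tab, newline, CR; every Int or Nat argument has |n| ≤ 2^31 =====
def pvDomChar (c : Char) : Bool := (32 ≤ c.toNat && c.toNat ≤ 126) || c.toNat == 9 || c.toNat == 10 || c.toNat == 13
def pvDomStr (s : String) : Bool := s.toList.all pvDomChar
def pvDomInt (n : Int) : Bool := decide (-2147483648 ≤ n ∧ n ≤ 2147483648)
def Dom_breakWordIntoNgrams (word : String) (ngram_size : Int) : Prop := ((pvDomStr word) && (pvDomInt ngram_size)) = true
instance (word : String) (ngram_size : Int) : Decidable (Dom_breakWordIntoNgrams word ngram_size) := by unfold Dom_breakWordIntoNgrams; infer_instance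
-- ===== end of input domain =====

-- B replaces A's branching recursion over suffixes by a single right-to-left DP pass that
-- maintains, for each j ≤ k, the length-j subsequences of the processed suffix (alternative).

-- ===== PORT A =====
-- A's recursion, on word.toList with k = ngram_size.toNat.  The Python diverges
-- (RecursionError) for ngram_size ≤ 0; the 'k = 0' branch is only a totality guard,
-- outside Pre_.  word[i] is always in range here, so pyGetD is exact.
def pvAChars (cs : List Char) (k : Nat) : List String :=
  if k = 1 then cs.map (fun c => String.ofList [c])
  else if _h0 : k = 0 then []
  else
    (PySem.List.pyRange 0 ((cs.length : Int) - (k : Int) + 1) 1).foldl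
      (fun ngrams i =>
        ngrams ++ (pvAChars (PySem.List.slice cs (some (i + 1)) none) (k - 1)).map
          (fun x => String.ofList [PySem.List.pyGetD cs i ' '] ++ x)) []
termination_by k
decreasing_by omega

def breakWordIntoNgrams (word : String) (ngram_size : Int) : List String :=
  pvAChars word.toList ngram_size.toNat

-- ===== PORT B =====
-- one DP step of Source B:  table' = [table[0]] + [[c + x for x in table[j-1]] + table[j] | j = 1..k];
-- zipWith pairs table[j-1] with table[j], exactly the comprehension over j = 1..k.
def pvBStep (c : Char) (table : List (List String)) : List (List String) :=
  match table with
  | [] => []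
  | t0 :: rest =>
      t0 :: List.zipWith (fun prev cur => prev.map (fun x => String.ofList [c] ++ x) ++ cur)
              (t0 :: rest) rest

-- early [] when k > len(word); else the DP pass.  The final 'table[k]': the table
-- always has length k+1, so getD is exact.
def breakWordIntoNgrams_alt (word : String) (ngram_size : Int) : List String :=
  if PySem.Str.len word < ngram_size then []
  else
    (word.toList.reverse.foldl (fun t c => pvBStep c t)
        ([""] :: List.replicate ngram_size.toNat [])).getD ngram_size.toNat []

-- ===== PRECONDITION & SPEC =====
-- Pre_ excludes ngram_size ≤ 0, where the Python A recurses with no base case and raises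
-- RecursionError (it never returns a value there).
def Pre_breakWordIntoNgrams (word : String) (ngram_size : Int) : Prop := 1 ≤ ngram_size
instance (word : String) (ngram_size : Int) : Decidable (Pre_breakWordIntoNgrams word ngram_size) := by unfold Pre_breakWordIntoNgrams; infer_instance
def pvWitness_breakWordIntoNgrams : String × Int := ("abc", 2)

def Spec_breakWordIntoNgrams (word : String) (ngram_size : Int) (out : List String) : Prop := out = breakWordIntoNgrams_alt word ngram_size
instance (word : String) (ngram_size : Int) (out : List String) : Decidable (Spec_breakWordIntoNgrams word ngram_size out) := by unfold Spec_breakWordIntoNgrams; infer_instance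

-- ===== CLAIM (what is proved, stated in full; the proofs are below) =====
def Claim_equal_breakWordIntoNgrams : Prop := ∀ (word : String) (ngram_size : Int), Dom_breakWordIntoNgrams word ngram_size → Pre_breakWordIntoNgrams word ngram_size → Spec_breakWordIntoNgrams word ngram_size (breakWordIntoNgrams word ngram_size)

-- ===== LEMMAS AND PROOFS =====

theorem pv_cat (c : Char) (l : List Char) :
    String.ofList [c] ++ String.ofList l = String.ofList (c :: l) :=
  (String.ofList_append).symm

-- a nonpositive bound gives an empty range
theorem pv_pyRange_nonpos (b : Int) (hb : b ≤ 0) : PySem.List.pyRange 0 b 1 = [] := by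
  unfold PySem.List.pyRange; split <;> simp_all

-- A's Int loop bound, as a Nat range
theorem pv_range_bridge (L j : Nat) :
    PySem.List.pyRange 0 ((L : Int) - (↑(j + 1 + 1) : Int) + 1) 1 =
      (List.range (L - (j + 1))).map (fun k : Nat => (k : Int)) := by
  by_cases h : j + 1 ≤ L
  · rw [show (L : Int) - (↑(j + 1 + 1) : Int) + 1 = ((L - (j + 1) : Nat) : Int) by push_cast; omega]
    exact PySem.List.pyRange_zero_natCast _
  · rw [show L - (j + 1) = 0 by omega, List.range_zero, List.map_nil]
    exact pv_pyRange_nonpos _ (by push_cast; omega)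

-- the head decomposition of A's index loop, at the level of combinations
theorem pv_comb_decomp (cs : List Char) (k : Nat) :
    PySem.List.combinations cs (k + 1) =
      (List.range (cs.length - k)).flatMap
        (fun i => (PySem.List.combinations (cs.drop (i + 1)) k).map
          (fun l => cs.getD i ' ' :: l)) := by
  induction cs generalizing k with
  | nil => simp [PySem.List.combinations_nil_succ]
  | cons c cs ih =>
    by_cases h : cs.length + 1 ≤ k
    · have hnil : PySem.List.combinations (c :: cs) (k + 1) = [] := by
        apply PySem.List.combinations_eq_nil_of_length_lt
        simp only [List.length_cons]; omega
      have h0 : (c :: cs).length - k = 0 := by simp only [List.length_cons]; omega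
      rw [hnil, h0, List.range_zero, List.flatMap_nil]
    · have hlen : (c :: cs).length - k = cs.length - k + 1 := by
        simp only [List.length_cons]; omega
      rw [PySem.List.combinations_cons_succ, hlen, List.range_succ_eq_map,
        List.flatMap_cons, List.flatMap_map]
      simp only [Nat.succ_eq_add_one, List.getD_cons_succ, List.drop_succ_cons,
        List.getD_cons_zero, List.drop_zero]
      rw [ih]

-- A computes the String.ofList image of combinations, for every k ≥ 1
theorem pv_aChars_eq (j : Nat) : ∀ (cs : List Char),
    pvAChars cs (j + 1) =
      (PySem.List.combinations cs (j + 1)).map (fun l => String.ofList l) := by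
  induction j with
  | zero =>
    intro cs
    rw [pvAChars, if_pos rfl, PySem.List.combinations_one, List.map_map]
    simp [Function.comp]
  | succ j ih =>
    intro cs
    rw [pvAChars, if_neg (by omega), dif_neg (by omega),
      PySem.List.foldl_append_eq_flatMap, List.nil_append]
    simp only [Nat.add_sub_cancel]
    rw [pv_range_bridge cs.length j, List.flatMap_map]
    simp only [← Nat.cast_add_one, PySem.List.slice_from_natCast, PySem.List.pyGetD_natCast,
      ih, List.map_map, Function.comp_def, pv_cat]
    rw [pv_comb_decomp cs (j + 1)]
    simp only [List.map_flatMap, List.map_map, Function.comp_def]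

-- one DP step of B turns the table for cs into the table for c :: cs
theorem pv_bStep_tab (c : Char) (cs : List Char) (kn : Nat) :
    pvBStep c ((List.range (kn + 1)).map
        (fun j => (PySem.List.combinations cs j).map (fun l => String.ofList l))) =
      (List.range (kn + 1)).map
        (fun j => (PySem.List.combinations (c :: cs) j).map (fun l => String.ofList l)) := by
  have hsplit : (List.range (kn + 1)).map
      (fun j => (PySem.List.combinations cs j).map (fun l => String.ofList l)) =
      ((PySem.List.combinations cs 0).map (fun l => String.ofList l)) ::
        (List.range kn).map
          (fun j => (PySem.List.combinations cs (j + 1)).map (fun l => String.ofList l)) := by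
    rw [List.range_succ_eq_map, List.map_cons, List.map_map]
    simp [Function.comp, Nat.succ_eq_add_one]
  rw [hsplit]
  simp only [pvBStep]
  rw [← hsplit]
  apply List.ext_getElem
  · simp [List.length_zipWith]
  · intro n h1 h2
    match n with
    | 0 => simp [PySem.List.combinations_zero]
    | Nat.succ n =>
      have hn : n < kn := by
        simp only [List.length_cons, List.length_zipWith, List.length_map,
          List.length_range] at h1
        omega
      simp only [List.getElem_cons_succ, List.getElem_zipWith, List.getElem_map,
        List.getElem_range, Nat.succ_eq_add_one]
      rw [PySem.List.combinations_cons_succ, List.map_append, List.map_map, List.map_map]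
      simp only [Function.comp_def, pv_cat]

-- B's fold invariant: after consuming cs (right to left), the table is the combinations table
theorem pv_bTab (cs : List Char) (kn : Nat) :
    cs.reverse.foldl (fun t c => pvBStep c t) ([""] :: List.replicate kn []) =
      (List.range (kn + 1)).map
        (fun j => (PySem.List.combinations cs j).map (fun l => String.ofList l)) := by
  induction cs with
  | nil =>
    apply List.ext_getElem
    · simp
    · intro n h1 h2
      match n with
      | 0 => simp [PySem.List.combinations_zero]
      | Nat.succ n =>
        simp only [List.reverse_nil, List.foldl_nil, List.getElem_cons_succ]
        rw [List.getElem_replicate, List.getElem_map, List.getElem_range]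
        simp [PySem.List.combinations_nil_succ]
  | cons c cs ih =>
    rw [List.reverse_cons, List.foldl_append, ih]
    simp only [List.foldl_cons, List.foldl_nil]
    exact pv_bStep_tab c cs kn

-- ===== VERDICT (by name: the statement is the Claim_ definition above) =====
theorem breakWordIntoNgrams_spec : Claim_equal_breakWordIntoNgrams := by
  intro word n _ hpre
  unfold Spec_breakWordIntoNgrams breakWordIntoNgrams breakWordIntoNgrams_alt
  obtain ⟨m, hm⟩ : ∃ m, n.toNat = m + 1 :=
    ⟨n.toNat - 1, by unfold Pre_breakWordIntoNgrams at hpre; omega⟩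
  rw [hm, pv_aChars_eq m word.toList]
  by_cases hbig : PySem.Str.len word < n
  · rw [if_pos hbig]
    rw [PySem.Str.len_eq] at hbig
    rw [PySem.List.combinations_eq_nil_of_length_lt (xs := word.toList) (r := m + 1) (by omega), List.map_nil]
  · rw [if_neg hbig, pv_bTab word.toList (m + 1)]
    rw [List.getD_eq_getElem _ _ (by simp)]
    rw [List.getElem_map, List.getElem_range]
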